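-- pv_equiv track=rewrite | github.com/BlueBirdBack/mneme | scripts/mneme_compile_memory.py | heading_path_from_lines
-- ===== SOURCE A (Python) =====
-- def heading_path_from_lines(lines: list[tuple[int, str]], current_index: int) -> list[str]:
--     path: list[tuple[int, str]] = []
--     for i, line in lines:
--         if i >= current_index:
--             break
--         stripped = line.strip()
--         if stripped.startswith("#"):
--             level = len(stripped) - len(stripped.lstrip("#"))
--             title = stripped[level:].strip()
--             path = [x for x in path if x[0] < level]
--             path.append((level, title))
--     return [title for _level, title in path]
-- ===== SOURCE B (Python) =====
-- def heading_path_from_lines(lines: list[tuple[int, str]], current_index: int) -> list[str]: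
--     # 1) collect the lines before the first index >= current_index
--     prefix = []
--     for i, line in lines:
--         if i >= current_index:
--             break
--         prefix.append(line)
--     # 2) walk the prefix backwards keeping only headings whose level is
--     #    strictly below every heading level seen later in the document
--     path = []
--     min_level = None
--     for line in reversed(prefix):
--         stripped = line.strip()
--         if stripped.startswith("#"):
--             level = len(stripped) - len(stripped.lstrip("#"))
--             if min_level is None or level < min_level:
--                 path.insert(0, stripped[level:].strip())
--                 min_level = level
--     return path
-- ===== Notes on version B (the rewrite author's own statement) =====
-- stated objective: alternative
-- what changed: Instead of maintaining a breadcrumb stack that is re-filtered at every heading, B first cuts off the prefix before the break point and then walks it once in reverse, keeping a single min-level threshold and prepending each heading whose level is strictly below it.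
import Mathlib
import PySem

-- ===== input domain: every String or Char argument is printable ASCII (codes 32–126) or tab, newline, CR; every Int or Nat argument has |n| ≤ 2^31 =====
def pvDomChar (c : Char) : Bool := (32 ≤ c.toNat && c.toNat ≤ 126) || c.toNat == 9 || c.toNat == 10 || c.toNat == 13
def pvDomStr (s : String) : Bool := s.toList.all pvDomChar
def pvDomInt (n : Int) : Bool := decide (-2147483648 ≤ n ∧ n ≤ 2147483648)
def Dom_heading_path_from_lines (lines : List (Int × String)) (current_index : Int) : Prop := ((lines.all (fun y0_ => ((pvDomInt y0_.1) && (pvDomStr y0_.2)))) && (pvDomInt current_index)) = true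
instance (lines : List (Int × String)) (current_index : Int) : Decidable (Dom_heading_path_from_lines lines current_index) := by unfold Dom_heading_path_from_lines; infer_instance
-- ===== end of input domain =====

-- B replaces A's repeatedly re-filtered breadcrumb stack by one reverse pass over the
-- prefix before the break point, keeping a single min-level threshold (objective: alternative).

-- ===== PORT A =====
-- exact port of Python s.lstrip("#") (PySem has no left-only stripChars)
def pvLstripHash (s : String) : String := String.ofList (s.toList.dropWhile (fun c => c == '#'))

def pvAGo (current_index : Int) : List (Int × String) → List (Int × String) → List (Int × String)
  | [], path => path
  | (i, line) :: rest, path =>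
    if i ≥ current_index then path
    else
      let stripped := PySem.Str.strip line
      if PySem.Str.startswith stripped "#" then
        let level : Int := PySem.Str.len stripped - PySem.Str.len (pvLstripHash stripped)
        let title := PySem.Str.strip (PySem.Str.slice stripped (some level) none)
        pvAGo current_index rest (path.filter (fun x => decide (x.1 < level)) ++ [(level, title)])
      else pvAGo current_index rest path

def heading_path_from_lines (lines : List (Int × String)) (current_index : Int) : List String :=
  (pvAGo current_index lines []).map (fun x => x.2)

-- ===== PORT B =====
def pvBPrefix (current_index : Int) : List (Int × String) → List String
  | [] => []
  | (i, line) :: rest => if i ≥ current_index then [] else line :: pvBPrefix current_index rest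

def pvBScan : List String → Option Int → List String → List String
  | [], _, path => path
  | line :: rest, minLevel, path =>
    let stripped := PySem.Str.strip line
    if PySem.Str.startswith stripped "#" then
      let level : Int := PySem.Str.len stripped - PySem.Str.len (pvLstripHash stripped)
      if (match minLevel with | none => true | some m => decide (level < m)) then
        pvBScan rest (some level) (PySem.Str.strip (PySem.Str.slice stripped (some level) none) :: path)
      else pvBScan rest minLevel path
    else pvBScan rest minLevel path

def heading_path_from_lines_alt (lines : List (Int × String)) (current_index : Int) : List String :=
  pvBScan (pvBPrefix current_index lines).reverse none []

-- ===== PRECONDITION & SPEC =====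
def Spec_heading_path_from_lines (lines : List (Int × String)) (current_index : Int) (out : List String) : Prop := out = heading_path_from_lines_alt lines current_index
instance (lines : List (Int × String)) (current_index : Int) (out : List String) : Decidable (Spec_heading_path_from_lines lines current_index out) := by unfold Spec_heading_path_from_lines; infer_instance

-- ===== CLAIM (what is proved, stated in full; the proofs are below) =====
def Claim_equal_heading_path_from_lines : Prop := ∀ (lines : List (Int × String)) (current_index : Int), Dom_heading_path_from_lines lines current_index → Spec_heading_path_from_lines lines current_index (heading_path_from_lines lines current_index)

-- ===== LEMMAS AND PROOFS =====
-- per-line step of A's inner loop, as a fold step over the prefix strings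
def pvStep (path : List (Int × String)) (line : String) : List (Int × String) :=
  let stripped := PySem.Str.strip line
  if PySem.Str.startswith stripped "#" then
    let level : Int := PySem.Str.len stripped - PySem.Str.len (pvLstripHash stripped)
    let title := PySem.Str.strip (PySem.Str.slice stripped (some level) none)
    path.filter (fun x => decide (x.1 < level)) ++ [(level, title)]
  else path

theorem pvAGo_eq_foldl (ci : Int) (lines : List (Int × String)) (path : List (Int × String)) :
    pvAGo ci lines path = (pvBPrefix ci lines).foldl pvStep path := by
  induction lines generalizing path with
  | nil => simp [pvAGo, pvBPrefix]
  | cons hd tl ih =>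
    obtain ⟨i, line⟩ := hd
    by_cases h : i ≥ ci
    · simp [pvAGo, pvBPrefix, h]
    · simp only [pvAGo, pvBPrefix, if_neg h, List.foldl_cons, pvStep]
      split <;> exact ih _

theorem filter_lt_lt {l m : Int} (P : List (Int × String)) (h : l < m) :
    (P.filter (fun x => decide (x.1 < l))).filter (fun x => decide (x.1 < m))
      = P.filter (fun x => decide (x.1 < l)) := by
  induction P with
  | nil => rfl
  | cons p P ih =>
    by_cases hp : p.1 < l
    · simp [hp, ih, show p.1 < m by omega]
    · simp [hp, ih]

theorem filter_lt_ge {l m : Int} (P : List (Int × String)) (h : m ≤ l) :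
    (P.filter (fun x => decide (x.1 < l))).filter (fun x => decide (x.1 < m))
      = P.filter (fun x => decide (x.1 < m)) := by
  induction P with
  | nil => rfl
  | cons p P ih =>
    by_cases hp : p.1 < m
    · simp [hp, ih, show p.1 < l by omega]
    · by_cases hq : p.1 < l <;> simp [hp, hq, ih]

theorem pvBScan_some (ls : List String) : ∀ (m : Int) (res : List String),
    pvBScan ls.reverse (some m) res
      = ((ls.foldl pvStep []).filter (fun x => decide (x.1 < m))).map (fun x => x.2) ++ res := by
  induction ls using List.reverseRecOn with
  | nil => intro m res; simp [pvBScan]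
  | append_singleton ys x ih =>
    intro m res
    rw [List.reverse_append, List.reverse_singleton, List.singleton_append,
      List.foldl_append, List.foldl_cons, List.foldl_nil]
    simp only [pvBScan, pvStep, decide_eq_true_eq]
    by_cases hs : PySem.Str.startswith (PySem.Str.strip x) "#"
    · rw [if_pos hs, if_pos hs]
      generalize (PySem.Str.strip (PySem.Str.slice (PySem.Str.strip x)
        (some (PySem.Str.len (PySem.Str.strip x) - PySem.Str.len (pvLstripHash (PySem.Str.strip x)))))) = t
      generalize (PySem.Str.len (PySem.Str.strip x) - PySem.Str.len (pvLstripHash (PySem.Str.strip x))) = l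
      by_cases hlt : l < m
      · rw [if_pos hlt, ih, List.filter_append, filter_lt_lt _ hlt]
        simp [hlt]
      · rw [if_neg hlt, ih, List.filter_append, filter_lt_ge _ (by omega)]
        simp [hlt]
    · rw [if_neg hs, if_neg hs, ih]

theorem pvBScan_none (ls : List String) : ∀ (res : List String),
    pvBScan ls.reverse none res
      = ((ls.foldl pvStep []).map (fun x => x.2)) ++ res := by
  induction ls using List.reverseRecOn with
  | nil => intro res; simp [pvBScan]
  | append_singleton ys x ih =>
    intro res
    rw [List.reverse_append, List.reverse_singleton, List.singleton_append,
      List.foldl_append, List.foldl_cons, List.foldl_nil]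
    simp only [pvBScan, pvStep]
    by_cases hs : PySem.Str.startswith (PySem.Str.strip x) "#"
    · rw [if_pos hs, if_pos hs, if_pos trivial]
      generalize (PySem.Str.strip (PySem.Str.slice (PySem.Str.strip x)
        (some (PySem.Str.len (PySem.Str.strip x) - PySem.Str.len (pvLstripHash (PySem.Str.strip x)))))) = t
      generalize (PySem.Str.len (PySem.Str.strip x) - PySem.Str.len (pvLstripHash (PySem.Str.strip x))) = l
      rw [pvBScan_some]
      simp only [List.map_append, List.map_cons, List.map_nil, List.append_assoc,
        List.cons_append, List.nil_append]
    · rw [if_neg hs, if_neg hs, ih]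

-- ===== VERDICT (by name: the statement is the Claim_ definition above) =====
theorem heading_path_from_lines_spec : Claim_equal_heading_path_from_lines := by
  intro lines ci _
  show heading_path_from_lines lines ci = heading_path_from_lines_alt lines ci
  rw [heading_path_from_lines, heading_path_from_lines_alt, pvAGo_eq_foldl,
    pvBScan_none, List.append_nil]
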